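-- pv_equiv track=rewrite | github.com/PetzoldLab/mcsf-git | mcsf/1_extract_from_pair_list.py | reduce_bmrb_ids
-- ===== SOURCE A (Python) =====
-- def reduce_bmrb_ids(match_list):
--     """If more than one BMRB ID per PDB ID, choose most recent BMRB ID
--     """
--     # Collect BMRB IDs for each PDB ID
--     pdb_bmrb_match_dict = dict()
--     for _bmrb_id, _pdb_id in match_list:
--         if _pdb_id in pdb_bmrb_match_dict:
--             pdb_bmrb_match_dict[_pdb_id].append(_bmrb_id)
--         else:
--             pdb_bmrb_match_dict[_pdb_id] = [_bmrb_id]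
--
--     # Create new match list with unique BMRB IDs (pick highest ID)
--     pdb_bmrb_match_dict = {
--         bmrb_id: (max(pdb_ids) if (len(pdb_ids) > 1) else pdb_ids[0])
--         for bmrb_id, pdb_ids in pdb_bmrb_match_dict.items()
--     }
--
--     return pdb_bmrb_match_dict
-- ===== SOURCE B (Python) =====
-- def reduce_bmrb_ids(match_list):
--     """If more than one BMRB ID per PDB ID, choose most recent BMRB ID"""
--     best = {}
--     for bmrb_id, pdb_id in match_list:
--         cur = best.get(pdb_id)
--         if cur is None or bmrb_id > cur:
--             best[pdb_id] = bmrb_id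
--     return best
-- ===== Notes on version B (the rewrite author's own statement) =====
-- stated objective: simpler
-- what changed: Single pass maintaining a dict of pdb_id -> running max bmrb_id (strict >), instead of first grouping all bmrb_ids into per-key lists and then re-building the dict with max() per key.
import Mathlib
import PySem

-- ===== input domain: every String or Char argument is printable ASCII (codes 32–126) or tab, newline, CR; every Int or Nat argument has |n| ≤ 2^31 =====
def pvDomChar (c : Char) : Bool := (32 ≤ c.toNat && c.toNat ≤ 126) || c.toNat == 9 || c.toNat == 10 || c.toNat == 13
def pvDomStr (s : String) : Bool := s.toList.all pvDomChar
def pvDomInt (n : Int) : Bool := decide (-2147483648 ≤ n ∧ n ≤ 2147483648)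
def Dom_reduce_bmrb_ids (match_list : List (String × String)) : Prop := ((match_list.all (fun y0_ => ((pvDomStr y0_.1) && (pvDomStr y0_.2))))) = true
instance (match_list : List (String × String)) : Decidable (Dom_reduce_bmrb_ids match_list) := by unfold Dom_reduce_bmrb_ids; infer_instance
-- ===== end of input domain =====

-- B replaces A's two phases (group bmrb_ids into per-key lists, then rebuild the dict taking
-- max per key) by one pass keeping a running-max dict; same return value, objective: simpler.

-- ===== PORT A =====
def reduce_bmrb_ids (match_list : List (String × String)) : List (String × String) :=
  -- phase 1: pdb_bmrb_match_dict maps pdb_id -> list of bmrb_ids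
  let d := match_list.foldl (fun d p =>
      if d.contains p.2 then d.insert p.2 (d.getD p.2 [] ++ [p.1])
      else d.insert p.2 [p.1]) (PySem.Dict.empty : PySem.Dict String (List String))
  -- phase 2: dict comprehension with max(pdb_ids) / pdb_ids[0]
  (d.items.foldl (fun d2 q =>
      d2.insert q.1 (if q.2.length > 1 then (PySem.List.max? q.2 (fun x => x)).getD ""
                     else (PySem.List.pyGet? q.2 0).getD ""))
    (PySem.Dict.empty : PySem.Dict String String)).items

-- ===== PORT B =====
def reduce_bmrb_ids_alt (match_list : List (String × String)) : List (String × String) :=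
  (match_list.foldl (fun best p =>
      match best.get? p.2 with
      | none => best.insert p.2 p.1
      | some cur => if cur < p.1 then best.insert p.2 p.1 else best)
    (PySem.Dict.empty : PySem.Dict String String)).items

-- ===== PRECONDITION & SPEC =====
def Spec_reduce_bmrb_ids (match_list : List (String × String)) (out : List (String × String)) : Prop := out = reduce_bmrb_ids_alt match_list
instance (match_list : List (String × String)) (out : List (String × String)) : Decidable (Spec_reduce_bmrb_ids match_list out) := by unfold Spec_reduce_bmrb_ids; infer_instance

-- ===== CLAIM (what is proved, stated in full; the proofs are below) =====
def Claim_equal_reduce_bmrb_ids : Prop := ∀ (match_list : List (String × String)), Dom_reduce_bmrb_ids match_list → Spec_reduce_bmrb_ids match_list (reduce_bmrb_ids match_list)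

-- ===== LEMMAS AND PROOFS =====

-- value the second phase of A computes for a group list (= running max for nonempty lists)
def redv : List String → String
  | [] => ""
  | x :: t => t.foldl max x

def stepA (d : PySem.Dict String (List String)) (p : String × String) : PySem.Dict String (List String) :=
  if d.contains p.2 then d.insert p.2 (d.getD p.2 [] ++ [p.1])
  else d.insert p.2 [p.1]

def stepB (best : PySem.Dict String String) (p : String × String) : PySem.Dict String String :=
  match best.get? p.2 with
  | none => best.insert p.2 p.1
  | some cur => if cur < p.1 then best.insert p.2 p.1 else best

def PVInv (dA : PySem.Dict String (List String)) (dB : PySem.Dict String String) : Prop :=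
  dA.keys.Nodup ∧ (∀ q ∈ dA.items, q.2 ≠ []) ∧
  dB.items = dA.items.map (fun q => (q.1, redv q.2))

lemma redv_append (g : List String) (b : String) (hg : g ≠ []) :
    redv (g ++ [b]) = max (redv g) b := by
  cases g with
  | nil => exact absurd rfl hg
  | cons x t => simp [redv, List.foldl_append]

lemma keys_eq_of_items (dA : PySem.Dict String (List String)) (dB : PySem.Dict String String)
    (h : dB.items = dA.items.map (fun q => (q.1, redv q.2))) : dB.keys = dA.keys := by
  simp [PySem.Dict.keys, h, List.map_map, Function.comp]

lemma pv_items_empty {ν : Type} : (PySem.Dict.empty : PySem.Dict String ν).items = [] := rfl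

-- one step preserves the invariant
lemma step_inv (dA : PySem.Dict String (List String)) (dB : PySem.Dict String String)
    (p : String × String) (hInv : PVInv dA dB) : PVInv (stepA dA p) (stepB dB p) := by
  obtain ⟨hnd, hne, h⟩ := hInv
  have hkeys : dB.keys = dA.keys := keys_eq_of_items dA dB h
  have hndB : dB.keys.Nodup := by rw [hkeys]; exact hnd
  by_cases hc : dA.contains p.2 = true
  · -- key already present
    obtain ⟨old, hget⟩ : ∃ v, dA.get? p.2 = some v := by
      rcases hv : dA.get? p.2 with _ | v
      · rw [PySem.Dict.get?_eq_none_iff_contains] at hv; simp [hv] at hc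
      · exact ⟨v, rfl⟩
    have holdne : old ≠ [] := hne (p.2, old) (PySem.Dict.mem_items_of_get?_eq_some _ hget)
    have hgetD : dA.getD p.2 [] = old := PySem.Dict.getD_of_get?_eq_some _ _ hget
    have hmemB : (p.2, redv old) ∈ dB.items := by
      rw [h]
      exact List.mem_map.mpr ⟨(p.2, old), PySem.Dict.mem_items_of_get?_eq_some _ hget, rfl⟩
    have hgetB : dB.get? p.2 = some (redv old) := PySem.Dict.get?_of_mem_items _ hmemB hndB
    have hcB : dB.contains p.2 = true := by
      rw [PySem.Dict.contains_eq_isSome_get?, hgetB]; rfl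
    have hA : stepA dA p = dA.insert p.2 (old ++ [p.1]) := by
      simp [stepA, hc, hgetD]
    refine ⟨?_, ?_, ?_⟩
    · rw [hA]; exact PySem.Dict.nodup_keys_insert _ _ _ hnd
    · intro q hq
      rw [hA, PySem.Dict.items_insert_of_contains _ _ hc] at hq
      obtain ⟨r, hr, hrq⟩ := List.mem_map.mp hq
      by_cases hrk : r.1 == p.2
      · simp [hrk] at hrq; subst hrq; simp
      · simp [hrk] at hrq; subst hrq; exact hne _ hr
    · rw [hA, PySem.Dict.items_insert_of_contains _ _ hc, List.map_map]
      unfold stepB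
      rw [hgetB]
      by_cases hlt : redv old < p.1
      · simp only [hlt, if_true]
        rw [PySem.Dict.items_insert_of_contains _ _ hcB, h, List.map_map]
        apply List.map_congr_left
        intro q hq
        by_cases hk : q.1 = p.2
        · simp [Function.comp, hk, redv_append old p.1 holdne, max_eq_right (le_of_lt hlt)]
        · simp [Function.comp, hk]
      · simp only [hlt, if_false]
        rw [h]
        apply List.map_congr_left
        intro q hq
        by_cases hk : q.1 = p.2
        · have : q.2 = old := by
            have := PySem.Dict.get?_of_mem_items dA (k := q.1) (v := q.2) (by simpa using hq) hnd
            rw [hk, hget] at this; exact (Option.some_injective _ this).symm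
          simp [Function.comp, hk, this, redv_append old p.1 holdne,
                max_eq_left (le_of_not_gt hlt)]
        · simp [Function.comp, hk]
  · -- fresh key
    have hc' : dA.contains p.2 = false := by simpa using hc
    have hcB : dB.contains p.2 = false := by
      rw [PySem.Dict.contains_eq_decide_mem_keys, hkeys,
          ← PySem.Dict.contains_eq_decide_mem_keys]; exact hc'
    have hgetB : dB.get? p.2 = none := by
      rw [PySem.Dict.get?_eq_none_iff_contains]; exact hcB
    have hA : stepA dA p = dA.insert p.2 [p.1] := by simp [stepA, hc']
    refine ⟨?_, ?_, ?_⟩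
    · rw [hA]; exact PySem.Dict.nodup_keys_insert _ _ _ hnd
    · intro q hq
      rw [hA, PySem.Dict.items_insert_of_not_contains _ _ hc'] at hq
      rcases List.mem_append.mp hq with hq' | hq'
      · exact hne _ hq'
      · simp at hq'; subst hq'; simp
    · rw [hA, PySem.Dict.items_insert_of_not_contains _ _ hc']
      unfold stepB
      rw [hgetB]
      rw [PySem.Dict.items_insert_of_not_contains _ _ hcB, h]
      simp [redv]

lemma fold_inv (l : List (String × String)) (dA : PySem.Dict String (List String))
    (dB : PySem.Dict String String) (hInv : PVInv dA dB) :
    PVInv (l.foldl stepA dA) (l.foldl stepB dB) := by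
  induction l generalizing dA dB with
  | nil => exact hInv
  | cons p t ih => simpa using ih (stepA dA p) (stepB dB p) (step_inv dA dB p hInv)

-- A's second phase value equals redv on every list
lemma phase2_val (g : List String) :
    (if g.length > 1 then (PySem.List.max? g (fun x => x)).getD ""
     else (PySem.List.pyGet? g 0).getD "") = redv g := by
  match g with
  | [] => simp [redv, PySem.List.pyGet?]
  | [x] => simp [redv, PySem.List.pyGet?, PySem.List.pyIdx?]
  | x :: y :: t =>
      have : (x :: y :: t).length > 1 := by simp
      rw [if_pos this, PySem.List.max?_id_cons]
      simp [redv]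

-- ===== VERDICT (by name: the statement is the Claim_ definition above) =====
theorem reduce_bmrb_ids_spec : Claim_equal_reduce_bmrb_ids := by
  intro ml _
  unfold Spec_reduce_bmrb_ids reduce_bmrb_ids reduce_bmrb_ids_alt
  have h0 : PVInv PySem.Dict.empty PySem.Dict.empty := by
    refine ⟨?_, ?_, ?_⟩ <;> simp [PySem.Dict.keys_empty, pv_items_empty]
  obtain ⟨hnd, _, hitems⟩ := fold_inv ml PySem.Dict.empty PySem.Dict.empty h0
  set dA := ml.foldl stepA PySem.Dict.empty with hdA
  have hfoldA : ml.foldl (fun d p =>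
      if d.contains p.2 then d.insert p.2 (d.getD p.2 [] ++ [p.1])
      else d.insert p.2 [p.1]) (PySem.Dict.empty : PySem.Dict String (List String)) = dA := rfl
  have hfoldB : ml.foldl (fun best p =>
      match best.get? p.2 with
      | none => best.insert p.2 p.1
      | some cur => if cur < p.1 then best.insert p.2 p.1 else best)
      (PySem.Dict.empty : PySem.Dict String String) = ml.foldl stepB PySem.Dict.empty := rfl
  rw [hfoldA, hfoldB]
  have hfresh := PySem.Dict.items_foldl_insert_fresh (l := dA.items)
      (k := fun q => q.1)
      (v := fun q => if q.2.length > 1 then (PySem.List.max? q.2 (fun x => x)).getD ""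
                     else (PySem.List.pyGet? q.2 0).getD "")
      (d := (PySem.Dict.empty : PySem.Dict String String))
      (by intro a _; exact PySem.Dict.contains_empty _)
      (by simpa [PySem.Dict.keys] using hnd)
  rw [hfresh, hitems]
  simp only [pv_items_empty, List.nil_append]
  apply List.map_congr_left
  intro q _
  exact congrArg (fun v => (q.1, v)) (phase2_val q.2)
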